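-- pv_equiv track=rewrite | github.com/Martin1007Wang/EVI-RAG | scripts/build_retrieval_pipeline.py | _group_positive_edges_by_pair
-- ===== SOURCE A (Python) =====
-- from typing import Any, Dict, Iterable, List, Optional, Sequence, Set, Tuple
--
-- def _group_positive_edges_by_pair(
--     edge_src: Sequence[int],
--     edge_dst: Sequence[int],
--     positive_mask: Sequence[bool],
-- ) -> Dict[Tuple[int, int], List[int]]:
--     groups: Dict[Tuple[int, int], List[int]] = {}
--     for idx, keep in enumerate(positive_mask):
--         if not keep:
--             continue
--         u = int(edge_src[idx])
--         v = int(edge_dst[idx])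
--         key = (u, v) if u <= v else (v, u)
--         groups.setdefault(key, []).append(idx)
--     return groups
-- ===== SOURCE B (Python) =====
-- def _group_positive_edges_by_pair(edge_src, edge_dst, positive_mask):
--     def key_of(i):
--         u, v = int(edge_src[i]), int(edge_dst[i])
--         return (u, v) if u <= v else (v, u)
--     idxs = [i for i, keep in enumerate(positive_mask) if keep]
--     keyed = [(key_of(i), i) for i in idxs]
--     keys = list(dict.fromkeys(k for k, _ in keyed))
--     return {k: [i for kk, i in keyed if kk == k] for k in keys}
-- ===== Notes on version B (the rewrite author's own statement) =====
-- stated objective: alternative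
-- what changed: B is a staged comprehension pipeline with no incremental dict: it lists the kept indices, maps each to its normalized key, deduplicates the keys preserving first occurrence, and builds each group by filtering the keyed list, instead of A's single loop that grows a dict with setdefault-append.
import Mathlib
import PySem

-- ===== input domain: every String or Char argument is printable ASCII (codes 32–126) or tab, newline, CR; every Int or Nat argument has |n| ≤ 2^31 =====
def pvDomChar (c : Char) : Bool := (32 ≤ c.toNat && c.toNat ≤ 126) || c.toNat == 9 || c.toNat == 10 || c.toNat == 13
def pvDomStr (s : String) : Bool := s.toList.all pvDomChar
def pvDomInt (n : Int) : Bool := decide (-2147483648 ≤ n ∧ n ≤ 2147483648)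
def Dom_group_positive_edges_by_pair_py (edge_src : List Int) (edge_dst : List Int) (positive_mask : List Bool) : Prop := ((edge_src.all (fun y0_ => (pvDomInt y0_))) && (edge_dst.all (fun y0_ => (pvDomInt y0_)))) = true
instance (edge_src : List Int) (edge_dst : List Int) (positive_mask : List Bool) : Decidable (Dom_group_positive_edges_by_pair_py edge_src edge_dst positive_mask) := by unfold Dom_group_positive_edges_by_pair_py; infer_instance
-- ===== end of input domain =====

-- B replaces A's incremental setdefault-append dict loop by a staged comprehension pipeline:
-- kept indices, keyed list, ordered key dedup, one filter per key (objective: alternative, not faster).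

-- ===== PORT A =====
-- A's loop: for idx, keep in enumerate(mask): if not keep: continue; u,v = int(src[idx]), int(dst[idx]);
-- key normalized; groups.setdefault(key, []).append(idx)  — setdefault+append is Dict.modify key [] (· ++ [idx]).
-- pyGetD is exact under Pre_ (index in range); the dict is returned as its items list of triples.
def group_positive_edges_by_pair_py (edge_src : List Int) (edge_dst : List Int) (positive_mask : List Bool) : List (Int × Int × List Int) :=
  let groups : PySem.Dict (Int × Int) (List Int) :=
    (PySem.List.enumerate positive_mask 0).foldl
      (fun g p =>
        if !p.2 then g
        else
          let u := PySem.List.pyGetD edge_src p.1 0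
          let v := PySem.List.pyGetD edge_dst p.1 0
          let key := if u ≤ v then (u, v) else (v, u)
          g.modify key [] (· ++ [p.1]))
      PySem.Dict.empty
  groups.items.map (fun q => (q.1.1, q.1.2, q.2))

-- ===== PORT B =====
-- Source B's helper key_of(i): the normalized endpoint pair of edge i (indexing exact under Pre_).
def pvKeyOf (edge_src : List Int) (edge_dst : List Int) (i : Int) : Int × Int :=
  let u := PySem.List.pyGetD edge_src i 0
  let v := PySem.List.pyGetD edge_dst i 0
  if u ≤ v then (u, v) else (v, u)

-- Source B: comprehension of kept indices, map to (key, idx), dict.fromkeys dedup, one filter per key.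
def group_positive_edges_by_pair_py_alt (edge_src : List Int) (edge_dst : List Int) (positive_mask : List Bool) : List (Int × Int × List Int) :=
  let idxs : List Int := ((PySem.List.enumerate positive_mask 0).filter (·.2)).map (·.1)
  let keyed : List ((Int × Int) × Int) := idxs.map (fun i => (pvKeyOf edge_src edge_dst i, i))
  let keys := PySem.List.dedup (keyed.map (·.1))
  keys.map (fun k => (k.1, k.2, (keyed.filter (fun q => q.1 == k)).map (·.2)))

-- ===== PRECONDITION & SPEC =====
-- Pre_ excludes exactly the inputs where A raises IndexError: a True mask entry whose index is out of range of edge_src or edge_dst.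
def Pre_group_positive_edges_by_pair_py (edge_src : List Int) (edge_dst : List Int) (positive_mask : List Bool) : Prop :=
  ∀ i : Nat, i < positive_mask.length → positive_mask.getD i false = true →
    i < edge_src.length ∧ i < edge_dst.length
instance (edge_src : List Int) (edge_dst : List Int) (positive_mask : List Bool) : Decidable (Pre_group_positive_edges_by_pair_py edge_src edge_dst positive_mask) := by unfold Pre_group_positive_edges_by_pair_py; infer_instance

def pvWitness_group_positive_edges_by_pair_py : List Int × List Int × List Bool := ([1, 2, 2], [2, 1, 0], [true, true, false])

def Spec_group_positive_edges_by_pair_py (edge_src : List Int) (edge_dst : List Int) (positive_mask : List Bool) (out : List (Int × Int × List Int)) : Prop := out = group_positive_edges_by_pair_py_alt edge_src edge_dst positive_mask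
instance (edge_src : List Int) (edge_dst : List Int) (positive_mask : List Bool) (out : List (Int × Int × List Int)) : Decidable (Spec_group_positive_edges_by_pair_py edge_src edge_dst positive_mask out) := by unfold Spec_group_positive_edges_by_pair_py; infer_instance

-- ===== CLAIM (what is proved, stated in full; the proofs are below) =====
def Claim_equal_group_positive_edges_by_pair_py : Prop := ∀ (edge_src : List Int) (edge_dst : List Int) (positive_mask : List Bool), Dom_group_positive_edges_by_pair_py edge_src edge_dst positive_mask → Pre_group_positive_edges_by_pair_py edge_src edge_dst positive_mask → Spec_group_positive_edges_by_pair_py edge_src edge_dst positive_mask (group_positive_edges_by_pair_py edge_src edge_dst positive_mask)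

-- ===== LEMMAS AND PROOFS =====

-- the (key, idx) list underlying both versions
def pvKeyIdx (edge_src edge_dst : List Int) (l : List (Int × Bool)) : List ((Int × Int) × Int) :=
  ((l.filter (·.2)).map (·.1)).map (fun i => (pvKeyOf edge_src edge_dst i, i))

theorem pvKeyIdx_eq (edge_src edge_dst : List Int) (l : List (Int × Bool)) :
    pvKeyIdx edge_src edge_dst l = ((l.filter (·.2)).map (·.1)).map (fun i => (pvKeyOf edge_src edge_dst i, i)) := rfl

-- A's loop equals the modify-fold over pvKeyIdx
theorem pvA_fold (edge_src edge_dst : List Int) (l : List (Int × Bool)) (g : PySem.Dict (Int × Int) (List Int)) :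
    l.foldl
      (fun g p =>
        if !p.2 then g
        else
          let u := PySem.List.pyGetD edge_src p.1 0
          let v := PySem.List.pyGetD edge_dst p.1 0
          let key := if u ≤ v then (u, v) else (v, u)
          g.modify key [] (· ++ [p.1])) g
    = (pvKeyIdx edge_src edge_dst l).foldl (fun d q => d.modify q.1 [] (· ++ [q.2])) g := by
  induction l generalizing g with
  | nil => rfl
  | cons p rest ih =>
    simp only [pvKeyIdx, List.filter_cons] at ih ⊢
    cases hp : p.2
    · simpa [hp] using ih g
    · simpa [hp, pvKeyOf] using
        ih (g.modify (pvKeyOf edge_src edge_dst p.1) [] (· ++ [p.1]))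

-- ===== VERDICT (by name: the statement is the Claim_ definition above) =====
theorem group_positive_edges_by_pair_py_spec : Claim_equal_group_positive_edges_by_pair_py := by
  intro edge_src edge_dst positive_mask _ _
  unfold Spec_group_positive_edges_by_pair_py
  simp only [group_positive_edges_by_pair_py, group_positive_edges_by_pair_py_alt]
  rw [pvA_fold, ← pvKeyIdx_eq edge_src edge_dst]
  set ps := pvKeyIdx edge_src edge_dst (PySem.List.enumerate positive_mask 0) with hps
  have hnd : (ps.foldl (fun d q => d.modify q.1 [] (· ++ [q.2])) PySem.Dict.empty).keys.Nodup :=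
    PySem.Dict.nodup_keys_foldl_modify_key ps Prod.fst [] (fun _ q => (· ++ [q.2])) PySem.Dict.empty
      PySem.Dict.nodup_keys_empty
  rw [PySem.Dict.items_eq_map_keys _ hnd ([] : List Int)]
  rw [PySem.Dict.keys_foldl_modify_key]
  simp only [PySem.Dict.keys_empty, PySem.Set.update_nil_left, PySem.List.dedup_eq_ofList]
  rw [List.map_map]
  apply List.map_congr_left
  intro k hk
  simp only [Function.comp]
  rw [PySem.Dict.getD_foldl_modify_append]
  simp only [PySem.Dict.getD_empty, List.nil_append]
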